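-- pv_equiv track=rewrite | github.com/weejinyoung/sysout-algorithm | 프로그래머스/2/138476. 귤 고르기/귤 고르기.py | solution
-- ===== SOURCE A (Python) =====
-- def solution(k, tangerine):
--     answer = 0
--     map = {}
--     for item in tangerine:
--         map[item] = map.get(item, 0) + 1
--     sorted_map = dict(sorted(map.items(), key=lambda item: item[1], reverse=True))
--
--     for key, value in sorted_map.items():
--         if k <= 0:
--             return answer
--         k -= value
--         answer += 1
--
--     return answer
-- ===== SOURCE B (Python) =====
-- def solution(k, tangerine):
--     freq = {}
--     for t in tangerine:
--         freq[t] = freq.get(t, 0) + 1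
--     if not freq or k <= 0:
--         return 0
--     maxf = max(freq.values())
--     cnt = {}
--     for f in freq.values():
--         cnt[f] = cnt.get(f, 0) + 1
--     answer = 0
--     for f in range(maxf, 0, -1):
--         for _ in range(cnt.get(f, 0)):
--             if k <= 0:
--                 return answer
--             k -= f
--             answer += 1
--     return answer
-- ===== Notes on version B (the rewrite author's own statement) =====
-- stated objective: faster
-- what changed: Replaces the comparison sort of the frequency dict (sorted by count descending, then greedy take) with a counting pass: a frequency-of-frequencies bucket table is built and consumed from the maximum frequency downward, eliminating the sort and the rebuilt dict.
import Mathlib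
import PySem

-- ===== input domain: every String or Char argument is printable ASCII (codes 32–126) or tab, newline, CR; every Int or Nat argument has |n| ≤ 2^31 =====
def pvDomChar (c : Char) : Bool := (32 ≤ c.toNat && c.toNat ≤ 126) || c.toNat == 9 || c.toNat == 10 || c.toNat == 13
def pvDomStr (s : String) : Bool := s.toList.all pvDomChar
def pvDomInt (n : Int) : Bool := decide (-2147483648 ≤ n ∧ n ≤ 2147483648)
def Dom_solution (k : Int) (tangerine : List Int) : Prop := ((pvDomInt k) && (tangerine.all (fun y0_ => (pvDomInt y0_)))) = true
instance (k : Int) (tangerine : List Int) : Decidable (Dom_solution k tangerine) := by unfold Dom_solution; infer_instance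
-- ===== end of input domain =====

-- B replaces A's sort-by-count-descending over the frequency dict with a bucket pass over a
-- frequency-of-frequencies table walked from the maximum frequency downward (objective: alternative).

-- ===== PORT A =====
-- the 'for key, value in sorted_map.items()' loop with its early return
def solutionLoop (k answer : Int) : List (Int × Int) → Int
  | [] => answer
  | (_, value) :: rest => if k ≤ 0 then answer else solutionLoop (k - value) (answer + 1) rest

def solution (k : Int) (tangerine : List Int) : Int :=
  let m := tangerine.foldl (fun d x => d.insert x (d.getD x 0 + 1)) PySem.Dict.empty
  let sortedItems := PySem.List.sorted m.items (fun p => p.2) true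
  let sortedMap := sortedItems.foldl (fun d p => d.insert p.1 p.2) PySem.Dict.empty
  solutionLoop k 0 sortedMap.items

-- ===== PORT B =====
-- the inner 'for _ in range(cnt.get(f, 0))' loop: Bool flag = "returned early"
def altInner (f : Int) : Nat → Int → Int → Bool × Int × Int
  | 0, k, a => (false, k, a)
  | n + 1, k, a => if k ≤ 0 then (true, k, a) else altInner f n (k - f) (a + 1)

-- the outer 'for f in range(maxf, 0, -1)' loop as the obvious descending recursion on f
def altOuter (cnt : PySem.Dict Int Int) (f : Int) (k a : Int) : Int :=
  if f ≤ 0 then a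
  else
    match altInner f ((cnt.getD f 0).toNat) k a with
    | (true, _, a') => a'
    | (false, k', a') => altOuter cnt (f - 1) k' a'
termination_by f.toNat
decreasing_by omega

def solution_alt (k : Int) (tangerine : List Int) : Int :=
  let freq := tangerine.foldl (fun d t => d.insert t (d.getD t 0 + 1)) PySem.Dict.empty
  if freq.items = [] ∨ k ≤ 0 then 0
  else
    let maxf := (PySem.List.max? freq.values (fun v => v)).getD 0
    let cnt := freq.values.foldl (fun d f => d.insert f (d.getD f 0 + 1)) PySem.Dict.empty
    altOuter cnt maxf k 0

-- ===== PRECONDITION & SPEC =====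
def Spec_solution (k : Int) (tangerine : List Int) (out : Int) : Prop := out = solution_alt k tangerine
instance (k : Int) (tangerine : List Int) (out : Int) : Decidable (Spec_solution k tangerine out) := by unfold Spec_solution; infer_instance

-- ===== CLAIM (what is proved, stated in full; the proofs are below) =====
def Claim_equal_solution : Prop := ∀ (k : Int) (tangerine : List Int), Dom_solution k tangerine → Spec_solution k tangerine (solution k tangerine)

-- ===== LEMMAS AND PROOFS =====

-- greedy consumption of a plain list of counts (the common denominator of both loops)
def pvConsume : Int → Int → List Int → Int
  | _, a, [] => a
  | k, a, v :: vs => if k ≤ 0 then a else pvConsume (k - v) (a + 1) vs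

-- the descending multiset [maxf repeated count maxf times, ..., 1 repeated count 1 times]
def pvDesc (l : List Int) (f : Int) : List Int :=
  if f ≤ 0 then [] else List.replicate (l.count f) f ++ pvDesc l (f - 1)
termination_by f.toNat
decreasing_by omega

theorem pvConsume_nonpos (k a : Int) (l : List Int) (h : k ≤ 0) : pvConsume k a l = a := by
  cases l <;> simp [pvConsume, h]

theorem solutionLoop_eq (l : List (Int × Int)) : ∀ k a, solutionLoop k a l = pvConsume k a (l.map Prod.snd) := by
  induction l with
  | nil => intro k a; rfl
  | cons p rest ih =>
    intro k a
    obtain ⟨key, value⟩ := p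
    by_cases h : k ≤ 0 <;> simp [solutionLoop, pvConsume, h, ih]

theorem altInner_consume (f : Int) : ∀ (n : Nat) (k a : Int) (rest : List Int),
    pvConsume k a (List.replicate n f ++ rest) =
      (match altInner f n k a with
       | (true, _, a') => a'
       | (false, k', a') => pvConsume k' a' rest) := by
  intro n
  induction n with
  | zero => intro k a rest; rfl
  | succ m ih =>
    intro k a rest
    by_cases h : k ≤ 0 <;> simp [List.replicate_succ, altInner, pvConsume, h, ih]

def pvBuckets (cnt : PySem.Dict Int Int) (f : Int) : List Int :=
  if f ≤ 0 then [] else List.replicate ((cnt.getD f 0).toNat) f ++ pvBuckets cnt (f - 1)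
termination_by f.toNat
decreasing_by omega

theorem altOuter_consume (cnt : PySem.Dict Int Int) (f k a : Int) :
    altOuter cnt f k a = pvConsume k a (pvBuckets cnt f) := by
  fun_induction altOuter cnt f k a with
  | case1 f k a h => rw [pvBuckets]; simp [h, pvConsume]
  | case2 f k a h p a' hm =>
    rw [pvBuckets]; simp only [h, reduceIte]
    rw [altInner_consume, hm]
  | case3 f k a h k' a' hm ih =>
    rw [pvBuckets]; simp only [h, reduceIte]
    rw [altInner_consume, hm, ih]

theorem pvBuckets_eq_pvDesc (cnt : PySem.Dict Int Int) (l : List Int)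
    (h : ∀ g : Int, cnt.getD g 0 = (l.count g : Int)) (f : Int) :
    pvBuckets cnt f = pvDesc l f := by
  by_cases hf : f ≤ 0
  · rw [pvBuckets, pvDesc]; simp [hf]
  · rw [pvBuckets, pvDesc]; simp only [hf, reduceIte]
    rw [h f, Int.toNat_natCast, pvBuckets_eq_pvDesc cnt l h (f - 1)]
termination_by f.toNat
decreasing_by omega

theorem pvDesc_congr (l l' : List Int) (f : Int)
    (h : ∀ g : Int, 0 < g → g ≤ f → l.count g = l'.count g) : pvDesc l f = pvDesc l' f := by
  conv_lhs => rw [pvDesc]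
  conv_rhs => rw [pvDesc]
  by_cases hf : f ≤ 0
  · simp [hf]
  · simp only [hf, reduceIte]
    rw [h f (by omega) le_rfl,
      pvDesc_congr l l' (f - 1) (fun g hg hgf => h g hg (by omega))]
termination_by f.toNat
decreasing_by omega

theorem pvDesc_perm (l : List Int) (f : Int)
    (h : ∀ x ∈ l, 0 < x ∧ x ≤ f) : (pvDesc l f).Perm l := by
  by_cases hf : f ≤ 0
  · have hl : l = [] := by
      cases l with
      | nil => rfl
      | cons x xs =>
        have := h x (List.mem_cons_self ..)
        omega
    subst hl
    rw [pvDesc]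
    simp [hf]
  · rw [pvDesc]; simp only [hf, reduceIte]
    have h1 : pvDesc l (f - 1) = pvDesc (l.filter (fun x => !(x == f))) (f - 1) := by
      refine pvDesc_congr _ _ _ (fun g hg hgf => ?_)
      have hg : ¬ g = f := by omega
      rw [List.count_filter (by simp [hg])]
    have h2 : (pvDesc (l.filter (fun x => !(x == f))) (f - 1)).Perm
        (l.filter (fun x => !(x == f))) := by
      refine pvDesc_perm _ _ (fun x hx => ?_)
      have hm := List.mem_of_mem_filter hx
      have hne : ¬ x = f := by
        have := List.of_mem_filter hx
        simpa using this
      have := h x hm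
      omega
    rw [h1, show List.replicate (l.count f) f = l.filter (fun x => x == f) from
      (List.filter_beq f).symm]
    exact (h2.append_left _).trans (List.filter_append_perm _ l)
termination_by f.toNat
decreasing_by omega

theorem mem_pvDesc (l : List Int) (f : Int) (x : Int) (hx : x ∈ pvDesc l f) : x ≤ f := by
  by_cases hf : f ≤ 0
  · rw [pvDesc] at hx; simp [hf] at hx
  · rw [pvDesc] at hx; simp only [hf, reduceIte, List.mem_append] at hx
    rcases hx with hx | hx
    · rw [List.eq_of_mem_replicate hx]
    · have := mem_pvDesc l (f - 1) x hx
      omega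
termination_by f.toNat
decreasing_by omega

theorem pvDesc_pairwise (l : List Int) (f : Int) :
    (pvDesc l f).Pairwise (fun a b => b ≤ a) := by
  by_cases hf : f ≤ 0
  · rw [pvDesc]; simp [hf]
  · rw [pvDesc]; simp only [hf, reduceIte]
    rw [List.pairwise_append]
    refine ⟨List.pairwise_replicate.mpr (Or.inr le_rfl), pvDesc_pairwise l (f - 1), ?_⟩
    intro a ha b hb
    rw [List.eq_of_mem_replicate ha]
    have := mem_pvDesc l (f - 1) b hb
    omega
termination_by f.toNat
decreasing_by omega

-- ===== VERDICT (by name: the statement is the Claim_ definition above) =====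
theorem pvCounter_fold (tangerine : List Int) :
    tangerine.foldl (fun d x => d.insert x (d.getD x 0 + 1)) PySem.Dict.empty
      = PySem.Dict.counter tangerine := rfl

theorem solution_spec : Claim_equal_solution := by
  intro k tangerine _
  show solution k tangerine = solution_alt k tangerine
  unfold solution solution_alt
  dsimp only []
  rw [pvCounter_fold]
  set C := PySem.Dict.counter tangerine with hC
  set sortedItems := PySem.List.sorted C.items (fun p => p.2) true with hSI
  -- dict(sorted(...)) re-lists exactly the sorted items (keys are distinct)
  have hperm : sortedItems.Perm C.items := PySem.List.sorted_perm ..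
  have hnodup : (sortedItems.map Prod.fst).Nodup := by
    refine ((hperm.map Prod.fst).nodup_iff).mpr ?_
    exact PySem.Dict.nodup_keys_counter tangerine
  have hitems : (sortedItems.foldl (fun d p => d.insert p.1 p.2) PySem.Dict.empty).items
      = sortedItems := by
    rw [PySem.Dict.items_foldl_insert_fresh sortedItems Prod.fst Prod.snd PySem.Dict.empty
      (fun a _ => PySem.Dict.contains_empty a.1) hnodup]
    simp [PySem.Dict.empty]
  rw [hitems, solutionLoop_eq]
  -- the A-side value list, descending by construction of sorted(..., reverse=True)
  have hVApw : (sortedItems.map Prod.snd).Pairwise (fun a b => b ≤ a) := by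
    rw [List.pairwise_map]
    exact PySem.List.sorted_pairwise_rev ..
  have hVAperm : (sortedItems.map Prod.snd).Perm C.values := hperm.map Prod.snd
  by_cases hcond : C.items = [] ∨ k ≤ 0
  · simp only [hcond, if_pos]
    rcases hcond with hnil | hk
    · rw [hSI, hnil]
      simp [PySem.List.sorted, pvConsume]
    · exact pvConsume_nonpos _ _ _ hk
  · simp only [hcond, reduceIte]
    push Not at hcond
    obtain ⟨hne, hk⟩ := hcond
    -- max(freq.values()) is some m
    have hvne : C.values ≠ [] := by
      simpa [PySem.Dict.values] using hne
    obtain ⟨m, hm⟩ : ∃ m, PySem.List.max? C.values (fun v => v) = some m := by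
      cases hmx : PySem.List.max? C.values (fun v => v) with
      | none => exact absurd ((PySem.List.max?_eq_none_iff _ _).mp hmx) hvne
      | some m => exact ⟨m, rfl⟩
    rw [hm]
    simp only [Option.getD_some]
    -- cnt.get(f, 0) is the multiplicity of f among the frequencies
    rw [pvCounter_fold C.values, altOuter_consume,
      pvBuckets_eq_pvDesc (PySem.Dict.counter C.values) C.values
        (fun g => PySem.Dict.getD_counter ..) m]
    -- every frequency is positive and at most m
    have hbound : ∀ x ∈ C.values, 0 < x ∧ x ≤ m := by
      intro x hx
      refine ⟨?_, PySem.List.max?_isMax hm x hx⟩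
      have hx' : x ∈ C.values := hx
      rw [hC] at hx'
      simp only [PySem.Dict.values, PySem.Dict.items_counter, List.map_map] at hx'
      obtain ⟨key, hkey, rfl⟩ := List.mem_map.mp hx'
      have : key ∈ tangerine := (PySem.Set.mem_ofList ..).mp hkey
      have : 0 < tangerine.count key := List.count_pos_iff.mpr this
      simp only [Function.comp]
      omega
    -- both value sequences are descending rearrangements of the same multiset, hence equal
    have heq : sortedItems.map Prod.snd = pvDesc C.values m :=
      List.Perm.eq_of_pairwise (fun a b _ _ h1 h2 => le_antisymm h2 h1)
        hVApw (pvDesc_pairwise C.values m)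
        (hVAperm.trans (pvDesc_perm C.values m hbound).symm)
    rw [heq]
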